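-- pv_equiv track=rewrite | github.com/Kalyan96/Tunnelled-App-Chat | prob1.py | solution
-- ===== SOURCE A (Python) =====
-- def solution(A, Y):
--     # write your code in Python 3.6
--     total_add=0
--     total_points=0
--     for i in range(0,len(A)):
--         for j in range(i+1,len(A)):
--             for k in range(j+1,len(A)):
--                 total_add=A[i]+A[j]+A[k]
--                 if total_add%Y == 0:
--                     total_points=total_points+1
--     return total_points
-- ===== SOURCE B (Python) =====
-- def solution(A, Y):
--     # One left-to-right pass: count pairs of earlier elements by the residue of
--     # their sum; each new element x completes pair_cnt[(-x) % Y] triples.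
--     total = 0
--     pair_cnt = {}
--     seen = []
--     for x in A:
--         total += pair_cnt.get((-x) % Y, 0)
--         for y in seen:
--             r = (x + y) % Y
--             pair_cnt[r] = pair_cnt.get(r, 0) + 1
--         seen.append(x)
--     return total
-- ===== Notes on version B (the rewrite author's own statement) =====
-- stated objective: faster
-- what changed: Replaced the O(n^3) triple nested index loop by a single left-to-right pass that keeps a dictionary counting pairs of earlier elements by the residue of their sum, so each new element completes pair_cnt[(-x) % Y] triples in O(1).
-- outside the precondition, e.g. on solution([1, 2], 0): A returns 0, B raises ZeroDivisionError
import Mathlib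
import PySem

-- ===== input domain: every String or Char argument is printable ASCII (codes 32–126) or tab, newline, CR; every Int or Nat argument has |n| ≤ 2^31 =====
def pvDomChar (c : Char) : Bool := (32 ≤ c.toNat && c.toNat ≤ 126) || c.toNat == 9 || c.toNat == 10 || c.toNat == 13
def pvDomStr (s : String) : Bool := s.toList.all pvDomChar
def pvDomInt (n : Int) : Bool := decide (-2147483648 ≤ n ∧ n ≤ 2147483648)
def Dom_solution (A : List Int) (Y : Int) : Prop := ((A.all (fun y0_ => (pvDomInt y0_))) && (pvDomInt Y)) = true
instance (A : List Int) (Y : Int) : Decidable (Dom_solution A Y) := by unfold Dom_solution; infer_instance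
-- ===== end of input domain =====

-- B replaces A's O(n^3) triple nested loop by one pass over the list that keeps a
-- dictionary counting pairs of earlier elements by the residue of their sum (objective: faster).

-- ===== PORT A =====
-- literal port of A's three nested index loops; the Python variable total_add is
-- (re)assigned before every read, so it is ported as the let-binding `ta` in the body.
def solution (A : List Int) (Y : Int) : Int :=
  let n : Int := PySem.List.len A
  (PySem.List.pyRange 0 n 1).foldl (fun tp i =>
    (PySem.List.pyRange (i + 1) n 1).foldl (fun tp j =>
      (PySem.List.pyRange (j + 1) n 1).foldl (fun tp k =>
        let ta := PySem.List.pyGetD A i 0 + PySem.List.pyGetD A j 0 + PySem.List.pyGetD A k 0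
        if PySem.Int.mod ta Y = 0 then tp + 1 else tp) tp) tp) 0

-- ===== PORT B =====
-- port of Source B: one pass; state = (total, pair_cnt : Dict residue → count, seen)
def solution_alt (A : List Int) (Y : Int) : Int :=
  (A.foldl (fun (st : Int × PySem.Dict Int Int × List Int) x =>
      let total := st.1 + PySem.Dict.getD st.2.1 (PySem.Int.mod (-x) Y) 0
      let pc := st.2.2.foldl (fun pc y =>
          let r := PySem.Int.mod (x + y) Y
          PySem.Dict.insert pc r (PySem.Dict.getD pc r 0 + 1)) st.2.1
      (total, pc, st.2.2 ++ [x])) ((0 : Int), PySem.Dict.empty, ([] : List Int))).1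

-- ===== PRECONDITION & SPEC =====
-- Pre_ excludes Y == 0: there the Python A raises ZeroDivisionError whenever len(A) >= 3
-- and returns 0 only vacuously (len(A) < 3), while B's residue arithmetic raises
-- ZeroDivisionError for every nonempty A.
def Pre_solution (A : List Int) (Y : Int) : Prop := Y ≠ 0
instance (A : List Int) (Y : Int) : Decidable (Pre_solution A Y) := by unfold Pre_solution; infer_instance
def pvWitness_solution : List Int × Int := ([1, 2, 3], 3)

def Spec_solution (A : List Int) (Y : Int) (out : Int) : Prop := out = solution_alt A Y
instance (A : List Int) (Y : Int) (out : Int) : Decidable (Spec_solution A Y out) := by unfold Spec_solution; infer_instance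

-- ===== CLAIM (what is proved, stated in full; the proofs are below) =====
def Claim_equal_solution : Prop := ∀ (A : List Int) (Y : Int), Dom_solution A Y → Pre_solution A Y → Spec_solution A Y (solution A Y)

-- ===== LEMMAS AND PROOFS =====

-- spec-side counting functions: pairs (a before b) / triples (in list order) satisfying a predicate
def paircount (q : Int → Int → Bool) : List Int → Nat
  | [] => 0
  | a :: l => l.countP (q a) + paircount q l

def tripcount (g : Int → Int → Int → Bool) : List Int → Nat
  | [] => 0
  | x :: l => paircount (g x) l + tripcount g l

lemma mod_def (a b : Int) : PySem.Int.mod a b = Int.fmod a b := rfl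

lemma mod_congr (Y u v : Int) (h : Y ∣ u - v) : PySem.Int.mod u Y = PySem.Int.mod v Y := by
  obtain ⟨k, hk⟩ := h
  have hu : u = Y * k + v := by linarith
  subst hu
  simp only [mod_def]
  exact Int.mul_add_fmod_self_left Y k v

lemma dvd_of_mod_eq (Y u v : Int) (h : PySem.Int.mod u Y = PySem.Int.mod v Y) : Y ∣ u - v := by
  have hu := PySem.Int.floordiv_mul_add_mod u Y
  have hv := PySem.Int.floordiv_mul_add_mod v Y
  exact ⟨PySem.Int.floordiv u Y - PySem.Int.floordiv v Y, by rw [mul_sub]; linarith⟩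

lemma mod_pair_iff (Y x a b : Int) :
    (PySem.Int.mod (a + b) Y = PySem.Int.mod (-x) Y) ↔ (PySem.Int.mod (a + b + x) Y = 0) := by
  rw [PySem.Int.mod_eq_zero_iff_dvd]
  constructor
  · intro h
    have := dvd_of_mod_eq Y (a + b) (-x) h
    simpa [sub_neg_eq_add] using this
  · intro h
    apply mod_congr
    simpa [sub_neg_eq_add] using h

-- generic index-shift for folds over integer ranges
lemma shift_fold {γ : Type} (f : γ → Int → γ) (a b : Int) (c : γ) :
    (PySem.List.pyRange (a + 1) (b + 1) 1).foldl f c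
      = (PySem.List.pyRange a b 1).foldl (fun acc i => f acc (i + 1)) c := by
  rw [PySem.List.pyRange_one, PySem.List.pyRange_one]
  have hd : (b + 1 - (a + 1)) = b - a := by ring
  rw [hd, List.foldl_map, List.foldl_map]
  have hfg : (fun (acc : γ) (k : ℕ) => f acc (a + 1 + (k : Int)))
      = fun (acc : γ) (k : ℕ) => f acc (a + (k : Int) + 1) := by
    funext acc k; congr 1; ring
  rw [hfg]

lemma getD_cons_shift (x : Int) (l : List Int) (i : Int) (hi : 0 ≤ i) (d : Int) :
    PySem.List.pyGetD (x :: l) (i + 1) d = PySem.List.pyGetD l i d := by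
  obtain ⟨n, rfl⟩ := Int.eq_ofNat_of_zero_le hi
  have h1 : ((n : Int) + 1) = ((n + 1 : Nat) : Int) := by push_cast; ring
  rw [h1, PySem.List.pyGetD_natCast, PySem.List.pyGetD_natCast]
  rfl

lemma len_cons (x : Int) (l : List Int) : PySem.List.len (x :: l) = PySem.List.len l + 1 := by
  simp [PySem.List.len_eq]

lemma len_nonneg (l : List Int) : 0 ≤ PySem.List.len l := by simp [PySem.List.len_eq]

-- the innermost k-loop of A, over a fixed partial sum u of two earlier elements
lemma L1 (Y u : Int) : ∀ (l : List Int) (c : Int),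
    (PySem.List.pyRange 0 (PySem.List.len l) 1).foldl
      (fun acc k => if PySem.Int.mod (u + PySem.List.pyGetD l k 0) Y = 0 then acc + 1 else acc) c
    = c + (l.countP (fun b => decide (PySem.Int.mod (u + b) Y = 0)) : Int) := by
  intro l
  induction l with
  | nil => intro c; simp [PySem.List.len_eq, PySem.List.pyRange_one_eq_nil]
  | cons x l ih =>
    intro c
    rw [len_cons, PySem.List.pyRange_one_cons (by linarith [len_nonneg l])]
    rw [List.foldl_cons, shift_fold]
    rw [PySem.List.foldl_congr_mem' (PySem.List.pyRange 0 (PySem.List.len l) 1) _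
      (fun acc k => if PySem.Int.mod (u + PySem.List.pyGetD l k 0) Y = 0 then acc + 1 else acc) _
      (by intro k hk acc
          rw [PySem.List.mem_pyRange_one] at hk
          simp only [getD_cons_shift x l k hk.1])]
    rw [ih]
    simp only [PySem.List.pyGetD_zero_cons, List.countP_cons, decide_eq_true_eq]
    split_ifs with h <;> push_cast <;> omega

-- the two inner loops of A, over a fixed first element x0
lemma L2 (Y x0 : Int) : ∀ (l : List Int) (c : Int),
    (PySem.List.pyRange 0 (PySem.List.len l) 1).foldl (fun acc j =>
      (PySem.List.pyRange (j + 1) (PySem.List.len l) 1).foldl (fun acc k =>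
        if PySem.Int.mod (x0 + PySem.List.pyGetD l j 0 + PySem.List.pyGetD l k 0) Y = 0
        then acc + 1 else acc) acc) c
    = c + (paircount (fun a b => decide (PySem.Int.mod (x0 + a + b) Y = 0)) l : Int) := by
  intro l
  induction l with
  | nil => intro c; simp [PySem.List.len_eq, PySem.List.pyRange_one_eq_nil, paircount]
  | cons x l ih =>
    intro c
    rw [len_cons, PySem.List.pyRange_one_cons (by linarith [len_nonneg l])]
    rw [List.foldl_cons, shift_fold]
    have hinit : (PySem.List.pyRange (0 + 1) (PySem.List.len l + 1) 1).foldl (fun acc k =>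
        if PySem.Int.mod (x0 + PySem.List.pyGetD (x :: l) 0 0 + PySem.List.pyGetD (x :: l) k 0) Y = 0
        then acc + 1 else acc) c
        = c + (l.countP (fun b => decide (PySem.Int.mod (x0 + x + b) Y = 0)) : Int) := by
      rw [shift_fold]
      rw [PySem.List.foldl_congr_mem' (PySem.List.pyRange 0 (PySem.List.len l) 1) _
        (fun acc k => if PySem.Int.mod (x0 + x + PySem.List.pyGetD l k 0) Y = 0 then acc + 1 else acc) c
        (by intro k hk acc
            rw [PySem.List.mem_pyRange_one] at hk
            simp only [getD_cons_shift x l k hk.1, PySem.List.pyGetD_zero_cons])]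
      exact L1 Y (x0 + x) l c
    rw [hinit]
    rw [PySem.List.foldl_congr_mem' (PySem.List.pyRange 0 (PySem.List.len l) 1) _
      (fun acc j => (PySem.List.pyRange (j + 1) (PySem.List.len l) 1).foldl (fun acc k =>
        if PySem.Int.mod (x0 + PySem.List.pyGetD l j 0 + PySem.List.pyGetD l k 0) Y = 0
        then acc + 1 else acc) acc) _
      (by intro j hj acc
          rw [PySem.List.mem_pyRange_one] at hj
          simp only []
          rw [show (j + 1 + 1 : Int) = (j + 1) + 1 from rfl, shift_fold]
          exact PySem.List.foldl_congr_mem' _ _ _ _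
            (by intro k hk acc2
                rw [PySem.List.mem_pyRange_one] at hk
                simp only [getD_cons_shift x l k (by linarith [hj.1, hk.1]), getD_cons_shift x l j hj.1]))]
    rw [ih]
    simp only [paircount]
    push_cast
    ring

-- all three loops of A
lemma L3 (Y : Int) : ∀ (l : List Int) (c : Int),
    (PySem.List.pyRange 0 (PySem.List.len l) 1).foldl (fun acc i =>
      (PySem.List.pyRange (i + 1) (PySem.List.len l) 1).foldl (fun acc j =>
        (PySem.List.pyRange (j + 1) (PySem.List.len l) 1).foldl (fun acc k =>
          if PySem.Int.mod (PySem.List.pyGetD l i 0 + PySem.List.pyGetD l j 0 + PySem.List.pyGetD l k 0) Y = 0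
          then acc + 1 else acc) acc) acc) c
    = c + (tripcount (fun u v w => decide (PySem.Int.mod (u + v + w) Y = 0)) l : Int) := by
  intro l
  induction l with
  | nil => intro c; simp [PySem.List.len_eq, PySem.List.pyRange_one_eq_nil, tripcount]
  | cons x l ih =>
    intro c
    rw [len_cons, PySem.List.pyRange_one_cons (by linarith [len_nonneg l])]
    rw [List.foldl_cons, shift_fold]
    have hinit : (PySem.List.pyRange (0 + 1) (PySem.List.len l + 1) 1).foldl (fun acc j =>
        (PySem.List.pyRange (j + 1) (PySem.List.len l + 1) 1).foldl (fun acc k =>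
          if PySem.Int.mod (PySem.List.pyGetD (x :: l) 0 0 + PySem.List.pyGetD (x :: l) j 0 + PySem.List.pyGetD (x :: l) k 0) Y = 0
          then acc + 1 else acc) acc) c
        = c + (paircount (fun a b => decide (PySem.Int.mod (x + a + b) Y = 0)) l : Int) := by
      rw [shift_fold]
      rw [PySem.List.foldl_congr_mem' (PySem.List.pyRange 0 (PySem.List.len l) 1) _
        (fun acc j => (PySem.List.pyRange (j + 1) (PySem.List.len l) 1).foldl (fun acc k =>
          if PySem.Int.mod (x + PySem.List.pyGetD l j 0 + PySem.List.pyGetD l k 0) Y = 0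
          then acc + 1 else acc) acc) c
        (by intro j hj acc
            rw [PySem.List.mem_pyRange_one] at hj
            simp only []
            rw [show (j + 1 + 1 : Int) = (j + 1) + 1 from rfl, shift_fold]
            exact PySem.List.foldl_congr_mem' _ _ _ _
              (by intro k hk acc2
                  rw [PySem.List.mem_pyRange_one] at hk
                  simp only [getD_cons_shift x l k (by linarith [hj.1, hk.1]),
                    getD_cons_shift x l j hj.1, PySem.List.pyGetD_zero_cons]))]
      exact L2 Y x l c
    rw [hinit]
    rw [PySem.List.foldl_congr_mem' (PySem.List.pyRange 0 (PySem.List.len l) 1) _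
      (fun acc i => (PySem.List.pyRange (i + 1) (PySem.List.len l) 1).foldl (fun acc j =>
        (PySem.List.pyRange (j + 1) (PySem.List.len l) 1).foldl (fun acc k =>
          if PySem.Int.mod (PySem.List.pyGetD l i 0 + PySem.List.pyGetD l j 0 + PySem.List.pyGetD l k 0) Y = 0
          then acc + 1 else acc) acc) acc) _
      (by intro i hi acc
          rw [PySem.List.mem_pyRange_one] at hi
          simp only []
          rw [show (i + 1 + 1 : Int) = (i + 1) + 1 from rfl, shift_fold]
          refine PySem.List.foldl_congr_mem' _ _ _ _ ?_
          intro j hj acc2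
          rw [PySem.List.mem_pyRange_one] at hj
          rw [show (j + 1 + 1 : Int) = (j + 1) + 1 from rfl, shift_fold]
          exact PySem.List.foldl_congr_mem' _ _ _ _
            (by intro k hk acc3
                rw [PySem.List.mem_pyRange_one] at hk
                simp only [getD_cons_shift x l k (by linarith [hi.1, hj.1, hk.1]),
                  getD_cons_shift x l j (by linarith [hi.1, hj.1]),
                  getD_cons_shift x l i hi.1]))]
    rw [ih]
    simp only [tripcount]
    push_cast
    ring

lemma solution_eq_trip (A : List Int) (Y : Int) :
    solution A Y = (tripcount (fun u v w => decide (PySem.Int.mod (u + v + w) Y = 0)) A : Int) := by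
  show (PySem.List.pyRange 0 (PySem.List.len A) 1).foldl _ 0 = _
  rw [L3 Y A 0]
  ring

lemma paircount_snoc (q : Int → Int → Bool) (p : List Int) (x : Int) :
    paircount q (p ++ [x]) = paircount q p + p.countP (fun a => q a x) := by
  induction p with
  | nil => simp [paircount]
  | cons a p ih => simp [paircount, ih, List.countP_cons]; omega

lemma tripcount_snoc (g : Int → Int → Int → Bool) (p : List Int) (x : Int) :
    tripcount g (p ++ [x]) = tripcount g p + paircount (fun a b => g a b x) p := by
  induction p with
  | nil => simp [tripcount, paircount]
  | cons a p ih => simp [tripcount, paircount, ih, paircount_snoc]; omega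

-- invariant of B's single pass: after the seen prefix p, `tot` counts the triples of p
-- and the dictionary counts the pairs of p by the residue of their sum
lemma B_loop (Y : Int) : ∀ (rest p : List Int) (tot : Int) (pc : PySem.Dict Int Int),
    tot = (tripcount (fun u v w => decide (PySem.Int.mod (u + v + w) Y = 0)) p : Int) →
    (∀ t, pc.getD t 0 = (paircount (fun a b => decide (PySem.Int.mod (a + b) Y = t)) p : Int)) →
    (rest.foldl (fun (st : Int × PySem.Dict Int Int × List Int) x =>
      let total := st.1 + PySem.Dict.getD st.2.1 (PySem.Int.mod (-x) Y) 0
      let pc := st.2.2.foldl (fun pc y =>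
          let r := PySem.Int.mod (x + y) Y
          PySem.Dict.insert pc r (PySem.Dict.getD pc r 0 + 1)) st.2.1
      (total, pc, st.2.2 ++ [x])) (tot, pc, p)).1
    = (tripcount (fun u v w => decide (PySem.Int.mod (u + v + w) Y = 0)) (p ++ rest) : Int) := by
  intro rest
  induction rest with
  | nil => intro p tot pc htot hpc; simpa using htot
  | cons x rest ih =>
    intro p tot pc htot hpc
    rw [List.foldl_cons]
    simp only []
    have hstep := ih (p ++ [x])
      (tot + PySem.Dict.getD pc (PySem.Int.mod (-x) Y) 0)
      (p.foldl (fun pc y =>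
          PySem.Dict.insert pc (PySem.Int.mod (x + y) Y)
            (PySem.Dict.getD pc (PySem.Int.mod (x + y) Y) 0 + 1)) pc)
      ?_ ?_
    · rw [hstep]
      rw [List.append_assoc, List.singleton_append]
    · -- total invariant
      rw [htot, hpc, tripcount_snoc]
      have hq : (fun a b => decide (PySem.Int.mod (a + b) Y = PySem.Int.mod (-x) Y))
          = (fun a b => decide (PySem.Int.mod (a + b + x) Y = 0)) := by
        funext a b
        simp only [decide_eq_decide]
        exact mod_pair_iff Y x a b
      rw [hq]
      push_cast
      ring
    · -- dictionary invariant
      intro t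
      have hmap : p.foldl (fun pc y =>
          PySem.Dict.insert pc (PySem.Int.mod (x + y) Y)
            (PySem.Dict.getD pc (PySem.Int.mod (x + y) Y) 0 + 1)) pc
          = (p.map (fun y => PySem.Int.mod (x + y) Y)).foldl
              (fun d r => PySem.Dict.insert d r (PySem.Dict.getD d r 0 + 1)) pc := by
        rw [List.foldl_map]
      rw [hmap, PySem.Dict.getD_foldl_insert_add_one, hpc, paircount_snoc]
      have hcnt : (p.map (fun y => PySem.Int.mod (x + y) Y)).count t
          = p.countP (fun a => decide (PySem.Int.mod (a + x) Y = t)) := by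
        rw [List.count_eq_countP, List.countP_map]
        apply List.countP_congr
        intro a _
        simp [Function.comp, Int.add_comm x a]
      rw [hcnt]
      push_cast
      ring

lemma solution_alt_eq_trip (A : List Int) (Y : Int) :
    solution_alt A Y = (tripcount (fun u v w => decide (PySem.Int.mod (u + v + w) Y = 0)) A : Int) := by
  show (A.foldl _ ((0 : Int), PySem.Dict.empty, ([] : List Int))).1 = _
  have := B_loop Y A [] 0 PySem.Dict.empty (by simp [tripcount]) (by intro t; simp [paircount, PySem.Dict.getD_empty])
  simpa using this

-- ===== VERDICT (by name: the statement is the Claim_ definition above) =====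
theorem solution_spec : Claim_equal_solution := by
  intro A Y _ _
  unfold Spec_solution
  rw [solution_eq_trip, solution_alt_eq_trip]
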